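-- pv_equiv track=rewrite | github.com/vishalkallem/Unscramble-GRE-Words | scramble.py | is_unscrambled_word
-- ===== SOURCE A (Python) =====
-- from collections import Counter
--
-- def is_unscrambled_word(orig, candidate, n):
--     if len(candidate) == n:
--         given_word_counter = Counter(orig)
--         word_counter = Counter(candidate)
--         given_word_counter.subtract(word_counter)
--         if not any([c < 0 for c in given_word_counter.values()]):
--             return True
--     return False
-- ===== SOURCE B (Python) =====
-- def is_unscrambled_word(orig, candidate, n):
--     if len(candidate) != n:
--         return False
--     o = sorted(orig)
--     c = sorted(candidate)
--     i = 0
--     m = len(o)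
--     for ch in c:
--         while i < m and o[i] < ch:
--             i += 1
--         if i == m or o[i] != ch:
--             return False
--         i += 1
--     return True
-- ===== Notes on version B (the rewrite author's own statement) =====
-- stated objective: alternative
-- what changed: B replaces A's two Counters, subtract and values scan by sorting both strings and running a single two-pointer merge scan that checks the sorted candidate is a subsequence of the sorted orig (multiset inclusion via ordered merge instead of counting).
import Mathlib
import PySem

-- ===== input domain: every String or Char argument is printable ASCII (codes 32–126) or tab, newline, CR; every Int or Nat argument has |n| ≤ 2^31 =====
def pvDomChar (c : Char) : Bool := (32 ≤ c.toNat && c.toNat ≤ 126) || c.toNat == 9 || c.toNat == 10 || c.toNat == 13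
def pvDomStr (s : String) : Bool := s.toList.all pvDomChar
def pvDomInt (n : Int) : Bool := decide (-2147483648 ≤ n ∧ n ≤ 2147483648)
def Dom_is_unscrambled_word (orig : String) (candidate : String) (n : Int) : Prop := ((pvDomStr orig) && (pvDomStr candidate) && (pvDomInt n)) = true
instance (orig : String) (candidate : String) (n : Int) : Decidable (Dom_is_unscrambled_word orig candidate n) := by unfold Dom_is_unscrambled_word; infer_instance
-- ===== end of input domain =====

-- B replaces A's two Counters, subtract and full values scan by sorting both strings and
-- checking with a two-pointer merge scan that the sorted candidate is a subsequence of the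
-- sorted orig (alternative algorithm; same result by multiset inclusion).

-- ===== PORT A =====
def is_unscrambled_word (orig : String) (candidate : String) (n : Int) : Bool :=
  if PySem.Str.len candidate = n then
    let given_word_counter := PySem.Dict.counter orig.toList
    let word_counter := PySem.Dict.counter candidate.toList
    -- Counter.subtract: for each (k, v) of word_counter, self[k] = self.get(k, 0) - v
    let sub := word_counter.items.foldl (fun d kv => d.modify kv.1 0 (· - kv.2)) given_word_counter
    if (sub.values.any (fun c => c < 0)) = false then true
    else false
  else false

-- ===== PORT B =====
-- inner while loop: advance the orig pointer past elements smaller than ch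
def pvSkipLt (ch : Char) : List Char → List Char
  | [] => []
  | x :: xs => if x < ch then pvSkipLt ch xs else x :: xs

-- for ch in sorted(candidate): skip smaller orig chars, require a match, consume it
def pvMergeLoop : List Char → List Char → Bool
  | _, [] => true
  | o, ch :: cs =>
    match pvSkipLt ch o with
    | [] => false
    | x :: rest => if x ≠ ch then false else pvMergeLoop rest cs

def is_unscrambled_word_alt (orig : String) (candidate : String) (n : Int) : Bool :=
  if PySem.Str.len candidate ≠ n then false
  else pvMergeLoop (PySem.List.sorted orig.toList (fun x => x) false)
                   (PySem.List.sorted candidate.toList (fun x => x) false)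

-- ===== PRECONDITION & SPEC =====
def Spec_is_unscrambled_word (orig : String) (candidate : String) (n : Int) (out : Bool) : Prop := out = is_unscrambled_word_alt orig candidate n
instance (orig : String) (candidate : String) (n : Int) (out : Bool) : Decidable (Spec_is_unscrambled_word orig candidate n out) := by unfold Spec_is_unscrambled_word; infer_instance

-- ===== CLAIM (what is proved, stated in full; the proofs are below) =====
def Claim_equal_is_unscrambled_word : Prop := ∀ (orig : String) (candidate : String) (n : Int), Dom_is_unscrambled_word orig candidate n → Spec_is_unscrambled_word orig candidate n (is_unscrambled_word orig candidate n)

-- ===== LEMMAS AND PROOFS =====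

-- ---- A-side characterisation (counts) ----

-- getD through A's subtract fold: initial value minus the sum of subtracted values at that key
lemma pvSubFold_getD (items : List (Char × Int)) : ∀ (g : PySem.Dict Char Int) (c : Char),
    ((items.foldl (fun d kv => d.modify kv.1 0 (· - kv.2)) g).getD c 0)
      = g.getD c 0 - ((items.filter (fun kv => kv.1 = c)).map (·.2)).sum := by
  induction items with
  | nil => intro g c; simp
  | cons kv rest ih =>
    intro g c
    simp only [List.foldl_cons, List.filter_cons]
    rw [ih]
    by_cases h : kv.1 = c
    · subst h
      simp
      omega
    · rw [PySem.Dict.getD_modify]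
      simp [h, Ne.symm h]

-- on a Nodup list, filtering for equality with c yields [c] or []
lemma pvFilter_nodup_eq (l : List Char) (hn : l.Nodup) (c : Char) :
    l.filter (fun x => x = c) = if c ∈ l then [c] else [] := by
  induction l with
  | nil => simp
  | cons x rest ih =>
    simp only [List.nodup_cons] at hn
    rw [List.filter_cons]
    by_cases h : x = c
    · subst h
      simp only [decide_true, if_pos, List.mem_cons, true_or]
      have : x ∉ rest := hn.1
      rw [ih hn.2]
      simp [this]
    · simp only [h, decide_false, List.mem_cons]
      rw [ih hn.2]
      simp [Ne.symm h]

-- the value A's subtracted counter holds at c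
lemma pvSub_getD (orig cand : List Char) (c : Char) :
    (((PySem.Dict.counter cand (κ := Char)).items.foldl
        (fun d kv => d.modify kv.1 0 (· - kv.2)) (PySem.Dict.counter orig)).getD c 0)
      = (orig.count c : Int) - (if c ∈ cand then (cand.count c : Int) else 0) := by
  rw [pvSubFold_getD, PySem.Dict.getD_counter, PySem.Dict.items_counter]
  congr 1
  rw [List.filter_map]
  have hn : (PySem.Set.ofList cand).Nodup := PySem.Set.nodup_ofList cand
  have : (PySem.Set.ofList cand).filter ((fun kv => decide (kv.1 = c)) ∘ fun k => (k, (cand.count k : Int)))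
      = (PySem.Set.ofList cand).filter (fun x => x = c) := by
    apply List.filter_congr; intro x _; simp [Function.comp]
  rw [this, pvFilter_nodup_eq _ hn c]
  by_cases h : c ∈ cand
  · simp [h, PySem.Set.mem_ofList]
  · simp [h, PySem.Set.mem_ofList]

lemma pvA_iff (orig cand : String) (n : Int) :
    is_unscrambled_word orig cand n = true ↔
      (PySem.Str.len cand = n ∧ ∀ c ∈ cand.toList, cand.toList.count c ≤ orig.toList.count c) := by
  unfold is_unscrambled_word
  by_cases hlen : PySem.Str.len cand = n
  · rw [if_pos hlen]
    simp only [hlen, true_and]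
    set gwc := PySem.Dict.counter orig.toList with hg
    set wc := PySem.Dict.counter cand.toList with hw
    set sub := wc.items.foldl (fun d kv => d.modify kv.1 0 (· - kv.2)) gwc with hs
    have hnodup : sub.keys.Nodup := by
      rw [hs]
      exact PySem.Dict.nodup_keys_foldl_modify_key wc.items Prod.fst 0
        (fun d kv => (· - kv.2)) gwc (PySem.Dict.nodup_keys_counter orig.toList)
    have hvals : sub.values = sub.keys.map (fun k => sub.getD k 0) :=
      PySem.Dict.values_eq_map_keys sub hnodup 0
    have hgetD : ∀ c, sub.getD c 0
        = (orig.toList.count c : Int) - (if c ∈ cand.toList then (cand.toList.count c : Int) else 0) := by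
      intro c; rw [hs, hg, hw]; exact pvSub_getD orig.toList cand.toList c
    have key : ((sub.values.any (fun c => c < 0)) = false) ↔
        ∀ c ∈ cand.toList, cand.toList.count c ≤ orig.toList.count c := by
      constructor
      · intro hany c hc
        have hx : sub.getD c 0 ∈ sub.values := by
          rw [hvals]
          refine List.mem_map.mpr ⟨c, ?_, rfl⟩
          rw [hs, PySem.Dict.keys_foldl_modify_key, PySem.Set.mem_update]
          right
          show c ∈ wc.items.map Prod.fst
          have : wc.items.map Prod.fst = wc.keys := rfl
          rw [this, hw, PySem.Dict.keys_counter, PySem.Set.mem_ofList]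
          exact hc
        simp only [List.any_eq_false, decide_eq_true_eq] at hany
        have hv := hany _ hx
        rw [hgetD c, if_pos hc] at hv
        have : (cand.toList.count c : Int) ≤ (orig.toList.count c : Int) := by omega
        exact_mod_cast this
      · intro hall
        simp only [List.any_eq_false, decide_eq_true_eq]
        intro v hv
        rw [hvals] at hv
        rcases List.mem_map.mp hv with ⟨k, hk, rfl⟩
        rw [hgetD k]
        by_cases hkc : k ∈ cand.toList
        · have h1 := hall k hkc
          have : (cand.toList.count k : Int) ≤ (orig.toList.count k : Int) := by exact_mod_cast h1
          rw [if_pos hkc]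
          omega
        · rw [if_neg hkc]
          have : (0 : Int) ≤ (orig.toList.count k : Int) := Int.natCast_nonneg _
          omega
    by_cases hany : (sub.values.any (fun c => c < 0)) = false
    · rw [if_pos hany]
      simp only [true_iff]
      exact key.mp hany
    · rw [if_neg hany]
      simp only [Bool.false_eq_true, false_iff]
      intro hall
      exact hany (key.mpr hall)
  · rw [if_neg hlen]
    simp only [Bool.false_eq_true, false_iff]
    rintro ⟨h1, -⟩
    exact hlen h1

-- ---- B-side characterisation (sorted merge scan = sublist = multiset inclusion) ----

lemma pvSkipLt_eq_dropWhile (ch : Char) (o : List Char) :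
    pvSkipLt ch o = o.dropWhile (fun x => x < ch) := by
  induction o with
  | nil => rfl
  | cons x xs ih =>
    simp only [pvSkipLt, List.dropWhile_cons]
    by_cases h : x < ch <;> simp [h, ih]

-- the inner sublist cannot match inside a prefix of strictly smaller characters
lemma pvCons_sublist_of_lt (x : Char) (cs rest : List Char) :
    ∀ pre, (∀ y ∈ pre, y < x) → List.Sublist (x :: cs) (pre ++ x :: rest) → List.Sublist cs rest := by
  intro pre
  induction pre with
  | nil => intro _ h; exact List.cons_sublist_cons.mp h
  | cons p ps ih =>
    intro hlt h
    rcases List.sublist_cons_iff.mp h with h' | ⟨r, hr, -⟩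
    · exact ih (fun y hy => hlt y (List.mem_cons_of_mem _ hy)) h'
    · have hxp : x = p := by injection hr
      exact absurd (hlt p (List.mem_cons_self ..)) (by rw [← hxp]; exact lt_irrefl x)

-- the merge scan on two ≤-sorted lists decides the sublist relation
lemma pvMergeLoop_iff_sublist (c : List Char) : ∀ (o : List Char),
    o.Pairwise (· ≤ ·) → c.Pairwise (· ≤ ·) →
    (pvMergeLoop o c = true ↔ List.Sublist c o) := by
  induction c with
  | nil => intro o _ _; simp [pvMergeLoop]
  | cons ch cs ih =>
    intro o ho hc
    have hsplit : o = o.takeWhile (fun x => x < ch) ++ o.dropWhile (fun x => x < ch) :=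
      (List.takeWhile_append_dropWhile).symm
    have htake : ∀ y ∈ o.takeWhile (fun x => x < ch), y < ch := by
      intro y hy
      have := List.mem_takeWhile_imp hy
      simpa using this
    simp only [pvMergeLoop, pvSkipLt_eq_dropWhile]
    rcases hdrop : o.dropWhile (fun x => x < ch) with _ | ⟨x, rest⟩
    · simp only [Bool.false_eq_true, false_iff]
      intro hsub
      have hmem : ch ∈ o := hsub.subset (List.mem_cons_self ..)
      rw [hsplit, hdrop, List.append_nil] at hmem
      exact absurd (htake ch hmem) (lt_irrefl ch)
    · have hx : ¬ x < ch := by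
        have := List.head_dropWhile_not (p := fun x => decide (x < ch)) (l := o)
        simp only [hdrop] at this
        simpa using this (by simp)
      have hrest_ge : ∀ y ∈ rest, x ≤ y := by
        have hsorted : (x :: rest).Pairwise (· ≤ ·) := by
          rw [hsplit, hdrop] at ho
          exact (List.pairwise_append.mp ho).2.1
        exact fun y hy => (List.pairwise_cons.mp hsorted).1 y hy
      by_cases hxc : x = ch
      · subst hxc
        simp only [ne_eq, not_true_eq_false, ite_false]
        have hrest_sorted : rest.Pairwise (· ≤ ·) := by
          rw [hsplit, hdrop] at ho
          exact ((List.pairwise_append.mp ho).2.1).of_cons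
        have hcs_sorted : cs.Pairwise (· ≤ ·) := hc.of_cons
        rw [ih rest hrest_sorted hcs_sorted]
        constructor
        · intro hsub
          have h1 : List.Sublist (x :: cs) (x :: rest) := List.cons_sublist_cons.mpr hsub
          rw [hsplit, hdrop]
          exact h1.trans (List.sublist_append_right _ _)
        · intro hsub
          rw [hsplit, hdrop] at hsub
          exact pvCons_sublist_of_lt x cs rest _ htake hsub
      · simp only [ne_eq, hxc, not_false_eq_true, ite_true, Bool.false_eq_true, false_iff]
        intro hsub
        have hmem : ch ∈ o := hsub.subset (List.mem_cons_self ..)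
        rw [hsplit, hdrop] at hmem
        rcases List.mem_append.mp hmem with h | h
        · exact absurd (htake ch h) (lt_irrefl ch)
        · rcases List.mem_cons.mp h with h | h
          · exact hxc h.symm
          · exact hxc (le_antisymm (hrest_ge ch h) (not_lt.mp hx))

lemma pvB_iff (orig cand : String) (n : Int) :
    is_unscrambled_word_alt orig cand n = true ↔
      (PySem.Str.len cand = n ∧ ∀ c ∈ cand.toList, cand.toList.count c ≤ orig.toList.count c) := by
  unfold is_unscrambled_word_alt
  by_cases hlen : PySem.Str.len cand = n
  · rw [if_neg (not_not_intro hlen)]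
    simp only [hlen, true_and]
    set so := PySem.List.sorted orig.toList (fun x => x) false with hso
    set sc := PySem.List.sorted cand.toList (fun x => x) false with hsc
    have hpo : so.Pairwise (· ≤ ·) := by
      have := PySem.List.sorted_pairwise orig.toList (fun x => x)
      simpa using this
    have hpc : sc.Pairwise (· ≤ ·) := by
      have := PySem.List.sorted_pairwise cand.toList (fun x => x)
      simpa using this
    have hperm_o : so.Perm orig.toList := PySem.List.sorted_perm orig.toList _ _
    have hperm_c : sc.Perm cand.toList := PySem.List.sorted_perm cand.toList _ _
    rw [pvMergeLoop_iff_sublist sc so hpo hpc]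
    constructor
    · intro hsub c hc
      have hsp : List.Subperm cand.toList orig.toList :=
        (hperm_c.symm.subperm).trans (hsub.subperm.trans hperm_o.subperm)
      exact List.subperm_ext_iff.mp hsp c hc
    · intro hcount
      have hsp : List.Subperm sc so :=
        (hperm_c.subperm).trans ((List.subperm_ext_iff.mpr hcount).trans hperm_o.symm.subperm)
      exact List.sublist_of_subperm_of_pairwise hsp hpc hpo
  · rw [if_pos hlen]
    simp only [Bool.false_eq_true, false_iff]
    rintro ⟨h1, -⟩
    exact hlen h1

-- ===== VERDICT (by name: the statement is the Claim_ definition above) =====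
theorem is_unscrambled_word_spec : Claim_equal_is_unscrambled_word := by
  intro orig candidate n _
  unfold Spec_is_unscrambled_word
  have h := (pvA_iff orig candidate n).trans (pvB_iff orig candidate n).symm
  rcases h1 : is_unscrambled_word orig candidate n <;>
  rcases h2 : is_unscrambled_word_alt orig candidate n <;>
  simp_all
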